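-- pv_equiv track=rewrite | github.com/Emacs-is-my-life/cg-sim | sim/load/pytorch_profile/utils.py | parse_dot_attrs
-- ===== SOURCE A (Python) =====
-- def parse_dot_attrs(attr_text: str | None) -> dict[str, str]:
--     if not attr_text:
--         return {}
--
--     attrs: dict[str, str] = {}
--     pos = 0
--     length = len(attr_text)
--
--     while pos < length:
--         while pos < length and attr_text[pos] in " \t\r\n;,":
--             pos += 1
--         if pos >= length:
--             break
--
--         key_start = pos
--         while pos < length and attr_text[pos] not in " \t\r\n=":
--             pos += 1
--         key = attr_text[key_start:pos]
--
--         while pos < length and attr_text[pos] in " \t\r\n":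
--             pos += 1
--         if pos >= length or attr_text[pos] != "=":
--             while pos < length and attr_text[pos] not in ";,":
--                 pos += 1
--             continue
--
--         pos += 1
--         while pos < length and attr_text[pos] in " \t\r\n":
--             pos += 1
--
--         if pos < length and attr_text[pos] == '"':
--             pos += 1
--             value_chars = []
--             while pos < length:
--                 ch = attr_text[pos]
--                 if ch == "\\" and pos + 1 < length:
--                     value_chars.append(attr_text[pos + 1])
--                     pos += 2
--                     continue
--                 if ch == '"':
--                     pos += 1
--                     break
--                 value_chars.append(ch)
--                 pos += 1
--             value = "".join(value_chars)
--         else: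
--             value_start = pos
--             while pos < length and attr_text[pos] not in " \t\r\n;,":
--                 pos += 1
--             value = attr_text[value_start:pos]
--
--         attrs[key] = value
--
--     return attrs
-- ===== SOURCE B (Python) =====
-- def parse_dot_attrs(attr_text):
--     # Single-pass character DFA (states instead of A's position-driven inner loops).
--     if not attr_text:
--         return {}
--
--     attrs = {}
--     state = "skip"
--     key = ""
--     val = ""
--
--     for c in attr_text:
--         if state == "skip":
--             if c in " \t\r\n;,":
--                 pass
--             elif c == "=":
--                 key = ""
--                 state = "preval"
--             else:
--                 key = c
--                 state = "key"
--         elif state == "key":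
--             if c in " \t\r\n":
--                 state = "preeq"
--             elif c == "=":
--                 state = "preval"
--             else:
--                 key += c
--         elif state == "preeq":
--             if c in " \t\r\n":
--                 pass
--             elif c == "=":
--                 state = "preval"
--             elif c in ";,":
--                 state = "skip"
--             else:
--                 state = "resync"
--         elif state == "resync":
--             if c in ";,":
--                 state = "skip"
--         elif state == "preval":
--             if c in " \t\r\n":
--                 pass
--             elif c == '"':
--                 val = ""
--                 state = "qval"
--             elif c in ";,":
--                 attrs[key] = ""
--                 state = "skip"
--             else:
--                 val = c
--                 state = "value"
--         elif state == "value":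
--             if c in " \t\r\n;,":
--                 attrs[key] = val
--                 state = "skip"
--             else:
--                 val += c
--         elif state == "qval":
--             if c == "\\":
--                 state = "esc"
--             elif c == '"':
--                 attrs[key] = val
--                 state = "skip"
--             else:
--                 val += c
--         else:  # esc
--             val += c
--             state = "qval"
--
--     if state == "preval":
--         attrs[key] = ""
--     elif state == "value":
--         attrs[key] = val
--     elif state == "qval":
--         attrs[key] = val
--     elif state == "esc":
--         attrs[key] = val + "\\"
--
--     return attrs
-- ===== Notes on version B (the rewrite author's own statement) =====
-- stated objective: alternative
-- what changed: A's cursor-driven scanner (an outer loop with seven nested position-advancing while-loops and slicing) is replaced by a single-pass character DFA: one explicit state per parse phase (skip/key/preeq/resync/preval/value/qval/esc), one transition per character, plus an end-of-input finalisation.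
import Mathlib
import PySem

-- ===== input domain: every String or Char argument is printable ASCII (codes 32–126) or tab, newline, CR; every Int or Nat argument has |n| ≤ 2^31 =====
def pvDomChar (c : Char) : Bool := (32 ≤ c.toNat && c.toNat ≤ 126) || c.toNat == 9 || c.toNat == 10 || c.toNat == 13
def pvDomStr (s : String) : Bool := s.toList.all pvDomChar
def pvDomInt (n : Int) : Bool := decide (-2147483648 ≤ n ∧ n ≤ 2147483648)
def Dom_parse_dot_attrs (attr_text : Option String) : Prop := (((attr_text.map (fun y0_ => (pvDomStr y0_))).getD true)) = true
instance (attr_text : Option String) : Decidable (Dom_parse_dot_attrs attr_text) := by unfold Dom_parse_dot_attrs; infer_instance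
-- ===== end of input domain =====

-- B replaces A's cursor-driven scanner (an outer loop with seven inner while-loops over a position)
-- by a single-pass character DFA (one state per parse phase, one transition per character); same cost, different structure.

-- Character classes shared by both Pythons' membership tests ('c in " \t\r\n;,"' etc.); exact for every Char.
def pvIsWs (c : Char) : Bool := c == ' ' || c == '\t' || c == '\r' || c == '\n'
def pvIsSc (c : Char) : Bool := c == ';' || c == ','
def pvIsSep (c : Char) : Bool := pvIsWs c || pvIsSc c

-- ===== PORT A =====
-- Each inner 'while' of A is its own recursive helper advancing the position 'pos' over the fixed
-- char list.  Every loop recurses structurally on a fuel argument; the wrappers below supply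
-- fuel = l.length - pos, which is enough since each step advances pos by at least 1 (the fuel is
-- only a totality guard, it never changes the computed value on these calls).

-- while pos < length and attr_text[pos] in " \t\r\n;,": pos += 1
def aSkipSepsF (l : List Char) (fuel pos : Nat) : Nat :=
  match fuel with
  | 0 => pos
  | fuel + 1 =>
    if h : pos < l.length then
      if pvIsSep l[pos] then aSkipSepsF l fuel (pos + 1) else pos
    else pos

def aSkipSeps (l : List Char) (pos : Nat) : Nat := aSkipSepsF l (l.length - pos) pos

-- while pos < length and attr_text[pos] not in " \t\r\n=": pos += 1
def aKeyEndF (l : List Char) (fuel pos : Nat) : Nat :=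
  match fuel with
  | 0 => pos
  | fuel + 1 =>
    if h : pos < l.length then
      if pvIsWs l[pos] || l[pos] == '=' then pos else aKeyEndF l fuel (pos + 1)
    else pos

def aKeyEnd (l : List Char) (pos : Nat) : Nat := aKeyEndF l (l.length - pos) pos

-- while pos < length and attr_text[pos] in " \t\r\n": pos += 1
def aSkipWsF (l : List Char) (fuel pos : Nat) : Nat :=
  match fuel with
  | 0 => pos
  | fuel + 1 =>
    if h : pos < l.length then
      if pvIsWs l[pos] then aSkipWsF l fuel (pos + 1) else pos
    else pos

def aSkipWs (l : List Char) (pos : Nat) : Nat := aSkipWsF l (l.length - pos) pos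

-- while pos < length and attr_text[pos] not in ";,": pos += 1
def aResyncF (l : List Char) (fuel pos : Nat) : Nat :=
  match fuel with
  | 0 => pos
  | fuel + 1 =>
    if h : pos < l.length then
      if pvIsSc l[pos] then pos else aResyncF l fuel (pos + 1)
    else pos

def aResync (l : List Char) (pos : Nat) : Nat := aResyncF l (l.length - pos) pos

-- while pos < length and attr_text[pos] not in " \t\r\n;,": pos += 1
def aValueEndF (l : List Char) (fuel pos : Nat) : Nat :=
  match fuel with
  | 0 => pos
  | fuel + 1 =>
    if h : pos < l.length then
      if pvIsSep l[pos] then pos else aValueEndF l fuel (pos + 1)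
    else pos

def aValueEnd (l : List Char) (pos : Nat) : Nat := aValueEndF l (l.length - pos) pos

-- the quoted-value while loop: returns (value_chars, pos after the loop)
def aQuotedF (l : List Char) (fuel pos : Nat) (acc : List Char) : List Char × Nat :=
  match fuel with
  | 0 => (acc, pos)
  | fuel + 1 =>
    if h : pos < l.length then
      if h2 : l[pos] = '\\' ∧ pos + 1 < l.length then
        aQuotedF l fuel (pos + 2) (acc ++ [l[pos + 1]'h2.2])
      else if l[pos] = '"' then (acc, pos + 1)
      else aQuotedF l fuel (pos + 1) (acc ++ [l[pos]])
    else (acc, pos)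

def aQuoted (l : List Char) (pos : Nat) (acc : List Char) : List Char × Nat :=
  aQuotedF l (l.length - pos) pos acc

-- the outer 'while pos < length' loop of A (fuel l.length + 1 suffices: every iteration advances pos)
def aMainF (l : List Char) (fuel : Nat) (pos : Nat) (attrs : PySem.Dict String String) : PySem.Dict String String :=
  match fuel with
  | 0 => attrs
  | fuel + 1 =>
    if h0 : pos < l.length then
      let p1 := aSkipSeps l pos
      if h1 : p1 < l.length then
        let p2 := aKeyEnd l p1
        let key := String.mk ((l.drop p1).take (p2 - p1))
        let p3 := aSkipWs l p2
        if l[p3]? = some '=' then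
          let p5 := aSkipWs l (p3 + 1)
          if l[p5]? = some '"' then
            let r := aQuoted l (p5 + 1) []
            aMainF l fuel r.2 (attrs.insert key (String.mk r.1))
          else
            let p6 := aValueEnd l p5
            aMainF l fuel p6 (attrs.insert key (String.mk ((l.drop p5).take (p6 - p5))))
        else
          aMainF l fuel (aResync l p3) attrs
      else attrs
    else attrs

def aMain (l : List Char) (pos : Nat) (attrs : PySem.Dict String String) : PySem.Dict String String :=
  aMainF l (l.length - pos + 1) pos attrs

def parse_dot_attrs (attr_text : Option String) : List (String × String) :=
  match attr_text with
  | none => []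
  | some s =>
    if s.toList.isEmpty then []        -- 'if not attr_text: return {}'
    else (aMain s.toList 0 PySem.Dict.empty).items

-- ===== PORT B =====
-- One state per parse phase of B's DFA; 'key'/'val' accumulators live inside the state.
inductive BSt where
  | skip
  | key (k : List Char)
  | preeq (k : List Char)
  | resync
  | preval (k : List Char)
  | value (k v : List Char)
  | qval (k v : List Char)
  | esc (k v : List Char)
deriving DecidableEq, Repr

-- the body of B's single 'for c in attr_text' loop
def bStep (st : PySem.Dict String String × BSt) (c : Char) : PySem.Dict String String × BSt :=
  match st.2 with
  | .skip =>
    if pvIsSep c then st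
    else if c == '=' then (st.1, .preval [])
    else (st.1, .key [c])
  | .key k =>
    if pvIsWs c then (st.1, .preeq k)
    else if c == '=' then (st.1, .preval k)
    else (st.1, .key (k ++ [c]))
  | .preeq k =>
    if pvIsWs c then st
    else if c == '=' then (st.1, .preval k)
    else if pvIsSc c then (st.1, .skip)
    else (st.1, .resync)
  | .resync =>
    if pvIsSc c then (st.1, .skip) else st
  | .preval k =>
    if pvIsWs c then st
    else if c == '"' then (st.1, .qval k [])
    else if pvIsSc c then (st.1.insert (String.mk k) "", .skip)
    else (st.1, .value k [c])
  | .value k v =>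
    if pvIsSep c then (st.1.insert (String.mk k) (String.mk v), .skip)
    else (st.1, .value k (v ++ [c]))
  | .qval k v =>
    if c == '\\' then (st.1, .esc k v)
    else if c == '"' then (st.1.insert (String.mk k) (String.mk v), .skip)
    else (st.1, .qval k (v ++ [c]))
  | .esc k v => (st.1, .qval k (v ++ [c]))

-- the finalisation after B's loop
def bFin (st : PySem.Dict String String × BSt) : PySem.Dict String String :=
  match st.2 with
  | .preval k => st.1.insert (String.mk k) ""
  | .value k v => st.1.insert (String.mk k) (String.mk v)
  | .qval k v => st.1.insert (String.mk k) (String.mk v)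
  | .esc k v => st.1.insert (String.mk k) (String.mk (v ++ ['\\']))
  | _ => st.1

def parse_dot_attrs_alt (attr_text : Option String) : List (String × String) :=
  match attr_text with
  | none => []
  | some s =>
    if s.toList.isEmpty then []        -- 'if not attr_text: return {}'
    else (bFin (s.toList.foldl bStep (PySem.Dict.empty, .skip))).items

-- ===== PRECONDITION & SPEC =====
def Spec_parse_dot_attrs (attr_text : Option String) (out : List (String × String)) : Prop := out = parse_dot_attrs_alt attr_text
instance (attr_text : Option String) (out : List (String × String)) : Decidable (Spec_parse_dot_attrs attr_text out) := by unfold Spec_parse_dot_attrs; infer_instance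

-- ===== CLAIM (what is proved, stated in full; the proofs are below) =====
def Claim_equal_parse_dot_attrs : Prop := ∀ (attr_text : Option String), Dom_parse_dot_attrs attr_text → Spec_parse_dot_attrs attr_text (parse_dot_attrs attr_text)

-- ===== LEMMAS AND PROOFS =====

-- monotonicity of A's helpers (any fuel)
theorem aSkipSepsF_le (l : List Char) (fuel pos : Nat) : pos ≤ aSkipSepsF l fuel pos := by
  fun_induction aSkipSepsF l fuel pos <;> omega
theorem aSkipSeps_le (l : List Char) (pos : Nat) : pos ≤ aSkipSeps l pos :=
  aSkipSepsF_le l (l.length - pos) pos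
theorem aKeyEndF_le (l : List Char) (fuel pos : Nat) : pos ≤ aKeyEndF l fuel pos := by
  fun_induction aKeyEndF l fuel pos <;> omega
theorem aKeyEnd_le (l : List Char) (pos : Nat) : pos ≤ aKeyEnd l pos :=
  aKeyEndF_le l (l.length - pos) pos
theorem aSkipWsF_le (l : List Char) (fuel pos : Nat) : pos ≤ aSkipWsF l fuel pos := by
  fun_induction aSkipWsF l fuel pos <;> omega
theorem aSkipWs_le (l : List Char) (pos : Nat) : pos ≤ aSkipWs l pos :=
  aSkipWsF_le l (l.length - pos) pos
theorem aResyncF_le (l : List Char) (fuel pos : Nat) : pos ≤ aResyncF l fuel pos := by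
  fun_induction aResyncF l fuel pos <;> omega
theorem aResync_le (l : List Char) (pos : Nat) : pos ≤ aResync l pos :=
  aResyncF_le l (l.length - pos) pos
theorem aValueEndF_le (l : List Char) (fuel pos : Nat) : pos ≤ aValueEndF l fuel pos := by
  fun_induction aValueEndF l fuel pos <;> omega
theorem aValueEnd_le (l : List Char) (pos : Nat) : pos ≤ aValueEnd l pos :=
  aValueEndF_le l (l.length - pos) pos
theorem aQuotedF_le (l : List Char) (fuel pos : Nat) (acc : List Char) :
    pos ≤ (aQuotedF l fuel pos acc).2 := by
  fun_induction aQuotedF l fuel pos acc <;> omega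
theorem aQuoted_le (l : List Char) (pos : Nat) (acc : List Char) : pos ≤ (aQuoted l pos acc).2 :=
  aQuotedF_le l (l.length - pos) pos acc

-- what the character at each loop's stopping position can be (with sufficient fuel)
theorem aSkipSepsF_stop (l : List Char) (fuel pos : Nat) (hf : l.length - pos ≤ fuel)
    (h : aSkipSepsF l fuel pos < l.length) : pvIsSep (l[aSkipSepsF l fuel pos]'h) = false := by
  fun_induction aSkipSepsF l fuel pos with
  | case1 pos => omega
  | case2 pos fuel h1 h2 ih => exact ih (by omega) h
  | case3 pos fuel h1 h2 => simpa using h2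
  | case4 pos fuel h1 => omega
theorem aSkipSeps_stop (l : List Char) (pos : Nat) (h : aSkipSeps l pos < l.length) :
    pvIsSep (l[aSkipSeps l pos]'h) = false :=
  aSkipSepsF_stop l (l.length - pos) pos (by omega) h

theorem aKeyEndF_stop (l : List Char) (fuel pos : Nat) (hf : l.length - pos ≤ fuel)
    (h : aKeyEndF l fuel pos < l.length) :
    (pvIsWs (l[aKeyEndF l fuel pos]'h) || (l[aKeyEndF l fuel pos]'h) == '=') = true := by
  fun_induction aKeyEndF l fuel pos with
  | case1 pos => omega
  | case2 pos fuel h1 h2 => simpa using h2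
  | case3 pos fuel h1 h2 ih => exact ih (by omega) h
  | case4 pos fuel h1 => omega
theorem aKeyEnd_stop (l : List Char) (pos : Nat) (h : aKeyEnd l pos < l.length) :
    (pvIsWs (l[aKeyEnd l pos]'h) || (l[aKeyEnd l pos]'h) == '=') = true :=
  aKeyEndF_stop l (l.length - pos) pos (by omega) h

theorem aSkipWsF_stop (l : List Char) (fuel pos : Nat) (hf : l.length - pos ≤ fuel)
    (h : aSkipWsF l fuel pos < l.length) : pvIsWs (l[aSkipWsF l fuel pos]'h) = false := by
  fun_induction aSkipWsF l fuel pos with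
  | case1 pos => omega
  | case2 pos fuel h1 h2 ih => exact ih (by omega) h
  | case3 pos fuel h1 h2 => simpa using h2
  | case4 pos fuel h1 => omega
theorem aSkipWs_stop (l : List Char) (pos : Nat) (h : aSkipWs l pos < l.length) :
    pvIsWs (l[aSkipWs l pos]'h) = false :=
  aSkipWsF_stop l (l.length - pos) pos (by omega) h

theorem aResyncF_stop (l : List Char) (fuel pos : Nat) (hf : l.length - pos ≤ fuel)
    (h : aResyncF l fuel pos < l.length) : pvIsSc (l[aResyncF l fuel pos]'h) = true := by
  fun_induction aResyncF l fuel pos with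
  | case1 pos => omega
  | case2 pos fuel h1 h2 => simpa using h2
  | case3 pos fuel h1 h2 ih => exact ih (by omega) h
  | case4 pos fuel h1 => omega
theorem aResync_stop (l : List Char) (pos : Nat) (h : aResync l pos < l.length) :
    pvIsSc (l[aResync l pos]'h) = true :=
  aResyncF_stop l (l.length - pos) pos (by omega) h

theorem aValueEndF_stop (l : List Char) (fuel pos : Nat) (hf : l.length - pos ≤ fuel)
    (h : aValueEndF l fuel pos < l.length) : pvIsSep (l[aValueEndF l fuel pos]'h) = true := by
  fun_induction aValueEndF l fuel pos with
  | case1 pos => omega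
  | case2 pos fuel h1 h2 => simpa using h2
  | case3 pos fuel h1 h2 ih => exact ih (by omega) h
  | case4 pos fuel h1 => omega
theorem aValueEnd_stop (l : List Char) (pos : Nat) (h : aValueEnd l pos < l.length) :
    pvIsSep (l[aValueEnd l pos]'h) = true :=
  aValueEndF_stop l (l.length - pos) pos (by omega) h

-- one-step unfolding equations for the wrappers (the canonical fuel is re-established at pos + 1)
theorem aSkipWs_eq (l : List Char) (pos : Nat) :
    aSkipWs l pos
      = if h : pos < l.length then (if pvIsWs l[pos] then aSkipWs l (pos + 1) else pos) else pos := by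
  by_cases h : pos < l.length
  · obtain ⟨k, hk⟩ : ∃ k, l.length - pos = k + 1 := ⟨l.length - pos - 1, by omega⟩
    unfold aSkipWs
    rw [hk]
    simp only [aSkipWsF]
    rw [show l.length - (pos + 1) = k by omega]
  · unfold aSkipWs
    rw [show l.length - pos = 0 by omega]
    simp only [aSkipWsF]
    rw [dif_neg h]

theorem aResync_eq (l : List Char) (pos : Nat) :
    aResync l pos
      = if h : pos < l.length then (if pvIsSc l[pos] then pos else aResync l (pos + 1)) else pos := by
  by_cases h : pos < l.length
  · obtain ⟨k, hk⟩ : ∃ k, l.length - pos = k + 1 := ⟨l.length - pos - 1, by omega⟩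
    unfold aResync
    rw [hk]
    simp only [aResyncF]
    rw [show l.length - (pos + 1) = k by omega]
  · unfold aResync
    rw [show l.length - pos = 0 by omega]
    simp only [aResyncF]
    rw [dif_neg h]

theorem aValueEnd_eq (l : List Char) (pos : Nat) :
    aValueEnd l pos
      = if h : pos < l.length then (if pvIsSep l[pos] then pos else aValueEnd l (pos + 1)) else pos := by
  by_cases h : pos < l.length
  · obtain ⟨k, hk⟩ : ∃ k, l.length - pos = k + 1 := ⟨l.length - pos - 1, by omega⟩
    unfold aValueEnd
    rw [hk]
    simp only [aValueEndF]
    rw [show l.length - (pos + 1) = k by omega]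
  · unfold aValueEnd
    rw [show l.length - pos = 0 by omega]
    simp only [aValueEndF]
    rw [dif_neg h]

-- String.mk of the empty list is the empty-string literal
theorem mk_nil_eq : String.mk ([] : List Char) = "" := rfl

-- run B's fold over a remaining suffix and finalise
def Bfold (rest : List Char) (st : PySem.Dict String String × BSt) : PySem.Dict String String :=
  bFin (rest.foldl bStep st)

theorem Bfold_nil (st : PySem.Dict String String × BSt) : Bfold [] st = bFin st := rfl
theorem Bfold_cons (c : Char) (r : List Char) (st : PySem.Dict String String × BSt) :
    Bfold (c :: r) st = Bfold r (bStep st c) := rfl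

theorem drop_of_ge (l : List Char) (pos : Nat) (h : l.length ≤ pos) : l.drop pos = [] :=
  List.drop_eq_nil_of_le h

-- B stays in 'skip' over exactly the characters A's separator loop consumes
theorem L_sepsF (l : List Char) (fuel pos : Nat) (hf : l.length - pos ≤ fuel)
    (d : PySem.Dict String String) :
    Bfold (l.drop pos) (d, .skip) = Bfold (l.drop (aSkipSepsF l fuel pos)) (d, .skip) := by
  fun_induction aSkipSepsF l fuel pos with
  | case1 pos => rfl
  | case2 pos fuel h1 h2 ih =>
    rw [List.drop_eq_getElem_cons h1, Bfold_cons,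
      show bStep (d, BSt.skip) l[pos] = (d, BSt.skip) by simp [bStep, h2]]
    exact ih (by omega)
  | case3 pos fuel h1 h2 => rfl
  | case4 pos fuel h1 => rfl
theorem L_seps (l : List Char) (pos : Nat) (d : PySem.Dict String String) :
    Bfold (l.drop pos) (d, .skip) = Bfold (l.drop (aSkipSeps l pos)) (d, .skip) :=
  L_sepsF l (l.length - pos) pos (by omega) d

-- B stays in 'preeq k' over exactly the whitespace A skips after a key
theorem L_preeqF (l : List Char) (fuel pos : Nat) (hf : l.length - pos ≤ fuel)
    (d : PySem.Dict String String) (k : List Char) :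
    Bfold (l.drop pos) (d, .preeq k) = Bfold (l.drop (aSkipWsF l fuel pos)) (d, .preeq k) := by
  fun_induction aSkipWsF l fuel pos with
  | case1 pos => rfl
  | case2 pos fuel h1 h2 ih =>
    rw [List.drop_eq_getElem_cons h1, Bfold_cons,
      show bStep (d, BSt.preeq k) l[pos] = (d, BSt.preeq k) by simp [bStep, h2]]
    exact ih (by omega)
  | case3 pos fuel h1 h2 => rfl
  | case4 pos fuel h1 => rfl
theorem L_preeq (l : List Char) (pos : Nat) (d : PySem.Dict String String) (k : List Char) :
    Bfold (l.drop pos) (d, .preeq k) = Bfold (l.drop (aSkipWs l pos)) (d, .preeq k) :=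
  L_preeqF l (l.length - pos) pos (by omega) d k

-- B stays in 'preval k' over exactly the whitespace A skips after '='
theorem L_prevalF (l : List Char) (fuel pos : Nat) (hf : l.length - pos ≤ fuel)
    (d : PySem.Dict String String) (k : List Char) :
    Bfold (l.drop pos) (d, .preval k) = Bfold (l.drop (aSkipWsF l fuel pos)) (d, .preval k) := by
  fun_induction aSkipWsF l fuel pos with
  | case1 pos => rfl
  | case2 pos fuel h1 h2 ih =>
    rw [List.drop_eq_getElem_cons h1, Bfold_cons,
      show bStep (d, BSt.preval k) l[pos] = (d, BSt.preval k) by simp [bStep, h2]]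
    exact ih (by omega)
  | case3 pos fuel h1 h2 => rfl
  | case4 pos fuel h1 => rfl
theorem L_preval (l : List Char) (pos : Nat) (d : PySem.Dict String String) (k : List Char) :
    Bfold (l.drop pos) (d, .preval k) = Bfold (l.drop (aSkipWs l pos)) (d, .preval k) :=
  L_prevalF l (l.length - pos) pos (by omega) d k

-- B stays in 'resync' over exactly the characters A's resync loop consumes
theorem L_resyncF (l : List Char) (fuel pos : Nat) (hf : l.length - pos ≤ fuel)
    (d : PySem.Dict String String) :
    Bfold (l.drop pos) (d, .resync) = Bfold (l.drop (aResyncF l fuel pos)) (d, .resync) := by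
  fun_induction aResyncF l fuel pos with
  | case1 pos => rfl
  | case2 pos fuel h1 h2 => rfl
  | case3 pos fuel h1 h2 ih =>
    rw [List.drop_eq_getElem_cons h1, Bfold_cons,
      show bStep (d, BSt.resync) l[pos] = (d, BSt.resync) by simp [bStep, h2]]
    exact ih (by omega)
  | case4 pos fuel h1 => rfl
theorem L_resync (l : List Char) (pos : Nat) (d : PySem.Dict String String) :
    Bfold (l.drop pos) (d, .resync) = Bfold (l.drop (aResync l pos)) (d, .resync) :=
  L_resyncF l (l.length - pos) pos (by omega) d

-- B's 'key' state accumulates exactly the slice A cuts out with aKeyEnd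
theorem L_keyF (l : List Char) (fuel pos : Nat) (hf : l.length - pos ≤ fuel)
    (d : PySem.Dict String String) (k : List Char) :
    Bfold (l.drop pos) (d, .key k) =
      Bfold (l.drop (aKeyEndF l fuel pos)) (d, .key (k ++ (l.drop pos).take (aKeyEndF l fuel pos - pos))) := by
  fun_induction aKeyEndF l fuel pos generalizing k with
  | case1 pos => simp
  | case2 pos fuel h1 h2 => simp
  | case3 pos fuel h1 h2 ih =>
    have hle := aKeyEndF_le l fuel (pos + 1)
    simp only [Bool.or_eq_true, not_or, Bool.not_eq_true] at h2
    rw [List.drop_eq_getElem_cons h1, Bfold_cons,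
      show bStep (d, BSt.key k) l[pos] = (d, BSt.key (k ++ [l[pos]])) by
        simp [bStep, h2.1, h2.2]]
    rw [ih (by omega) (k ++ [l[pos]])]
    have ht : aKeyEndF l fuel (pos + 1) - pos = (aKeyEndF l fuel (pos + 1) - (pos + 1)) + 1 := by omega
    rw [ht, List.take_succ_cons]; simp
  | case4 pos fuel h1 => simp [drop_of_ge l pos (by omega)]
theorem L_key (l : List Char) (pos : Nat) (d : PySem.Dict String String) (k : List Char) :
    Bfold (l.drop pos) (d, .key k) =
      Bfold (l.drop (aKeyEnd l pos)) (d, .key (k ++ (l.drop pos).take (aKeyEnd l pos - pos))) :=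
  L_keyF l (l.length - pos) pos (by omega) d k

-- B's 'value' state accumulates exactly the slice A cuts out with aValueEnd
theorem L_valueF (l : List Char) (fuel pos : Nat) (hf : l.length - pos ≤ fuel)
    (d : PySem.Dict String String) (k v : List Char) :
    Bfold (l.drop pos) (d, .value k v) =
      Bfold (l.drop (aValueEndF l fuel pos)) (d, .value k (v ++ (l.drop pos).take (aValueEndF l fuel pos - pos))) := by
  fun_induction aValueEndF l fuel pos generalizing v with
  | case1 pos => simp
  | case2 pos fuel h1 h2 => simp
  | case3 pos fuel h1 h2 ih =>
    have hle := aValueEndF_le l fuel (pos + 1)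
    rw [List.drop_eq_getElem_cons h1, Bfold_cons,
      show bStep (d, BSt.value k v) l[pos] = (d, BSt.value k (v ++ [l[pos]])) by
        simp [bStep, h2]]
    rw [ih (by omega) (v ++ [l[pos]])]
    have ht : aValueEndF l fuel (pos + 1) - pos = (aValueEndF l fuel (pos + 1) - (pos + 1)) + 1 := by omega
    rw [ht, List.take_succ_cons]; simp
  | case4 pos fuel h1 => simp [drop_of_ge l pos (by omega)]
theorem L_value (l : List Char) (pos : Nat) (d : PySem.Dict String String) (k v : List Char) :
    Bfold (l.drop pos) (d, .value k v) =
      Bfold (l.drop (aValueEnd l pos)) (d, .value k (v ++ (l.drop pos).take (aValueEnd l pos - pos))) :=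
  L_valueF l (l.length - pos) pos (by omega) d k v

-- the quoted loop returns (acc, pos) unchanged past the end of input, whatever the fuel
theorem aQuotedF_ge (l : List Char) (fuel pos : Nat) (acc : List Char) (h : l.length ≤ pos) :
    aQuotedF l fuel pos acc = (acc, pos) := by
  cases fuel with
  | zero => rfl
  | succ fuel => unfold aQuotedF; rw [dif_neg (by omega)]

-- B's quoted-value states (qval/esc) track A's quoted loop, ending in an insert + 'skip'
theorem L_quotedF (l : List Char) (fuel pos : Nat) (v : List Char) (hf : l.length - pos ≤ fuel)
    (d : PySem.Dict String String) (k : List Char) :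
    Bfold (l.drop pos) (d, .qval k v) =
      Bfold (l.drop (aQuotedF l fuel pos v).2)
        (d.insert (String.mk k) (String.mk (aQuotedF l fuel pos v).1), .skip) := by
  fun_induction aQuotedF l fuel pos v with
  | case1 pos v => rw [drop_of_ge l pos (by omega)]; rfl
  | case2 pos v fuel h1 h2 ih =>
    rw [List.drop_eq_getElem_cons h1, Bfold_cons,
      show bStep (d, BSt.qval k v) l[pos] = (d, BSt.esc k v) by simp [bStep, h2.1]]
    rw [List.drop_eq_getElem_cons h2.2, Bfold_cons,
      show bStep (d, BSt.esc k v) l[pos + 1] = (d, BSt.qval k (v ++ [l[pos + 1]])) by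
        simp [bStep]]
    exact ih (by omega)
  | case3 pos v fuel h1 h2 h3 =>
    rw [List.drop_eq_getElem_cons h1, Bfold_cons,
      show bStep (d, BSt.qval k v) l[pos]
          = (d.insert (String.mk k) (String.mk v), BSt.skip) by simp [bStep, h3]]
  | case4 pos v fuel h1 h2 h3 ih =>
    by_cases hx : l[pos] = '\\'
    · -- a trailing backslash at end of input: both sides keep it and finish
      have hlen : ¬ pos + 1 < l.length := fun hl => h2 ⟨hx, hl⟩
      rw [List.drop_eq_getElem_cons h1, Bfold_cons,
        show bStep (d, BSt.qval k v) l[pos] = (d, BSt.esc k v) by simp [bStep, hx]]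
      rw [aQuotedF_ge l fuel (pos + 1) (v ++ [l[pos]]) (by omega),
        drop_of_ge l (pos + 1) (by omega)]
      simp [Bfold_nil, bFin, hx]
    · rw [List.drop_eq_getElem_cons h1, Bfold_cons,
        show bStep (d, BSt.qval k v) l[pos] = (d, BSt.qval k (v ++ [l[pos]])) by
          simp [bStep, hx, h3]]
      exact ih (by omega)
  | case5 pos v fuel h1 => rw [drop_of_ge l pos (by omega)]; rfl
theorem L_quoted (l : List Char) (pos : Nat) (d : PySem.Dict String String) (k v : List Char) :
    Bfold (l.drop pos) (d, .qval k v) =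
      Bfold (l.drop (aQuoted l pos v).2)
        (d.insert (String.mk k) (String.mk (aQuoted l pos v).1), .skip) :=
  L_quotedF l (l.length - pos) pos v (by omega) d k

-- after 'key =' has been read, A's value phase (ws skip, quoted or bare value, insert,
-- and the recursive continuation 'am') equals B's run from the 'preval' state
theorem L_glue (l : List Char) (q0 : Nat) (d : PySem.Dict String String) (kk : List Char)
    (am : Nat → PySem.Dict String String → PySem.Dict String String)
    (ham : ∀ p', q0 ≤ p' → ∀ d', am p' d' = Bfold (l.drop p') (d', .skip)) :
    (if l[aSkipWs l q0]? = some '"' then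
      am (aQuoted l (aSkipWs l q0 + 1) []).2
        (d.insert (String.mk kk) (String.mk (aQuoted l (aSkipWs l q0 + 1) []).1))
    else
      am (aValueEnd l (aSkipWs l q0))
        (d.insert (String.mk kk)
          (String.mk ((l.drop (aSkipWs l q0)).take (aValueEnd l (aSkipWs l q0) - aSkipWs l q0)))))
    = Bfold (l.drop q0) (d, .preval kk) := by
  rw [L_preval l q0 d kk]
  have hq5 := aSkipWs_le l q0
  cases hp5 : l[aSkipWs l q0]? with
  | none =>
    have h5n : l.length ≤ aSkipWs l q0 := List.getElem?_eq_none_iff.mp hp5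
    rw [if_neg (by simp)]
    have hv : aValueEnd l (aSkipWs l q0) = aSkipWs l q0 := by
      rw [aValueEnd_eq, dif_neg (by omega)]
    rw [hv, ham _ (by omega) _, Nat.sub_self, drop_of_ge l (aSkipWs l q0) h5n]
    simp [Bfold_nil, bFin, mk_nil_eq]
  | some c5 =>
    obtain ⟨h5lt, h5c⟩ := List.getElem?_eq_some_iff.mp hp5
    have h5w : pvIsWs c5 = false := by rw [← h5c]; exact aSkipWs_stop l q0 h5lt
    rw [List.drop_eq_getElem_cons h5lt, Bfold_cons, h5c]
    by_cases hq : c5 = '"'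
    · rw [if_pos (by rw [hq]),
        show bStep (d, BSt.preval kk) c5 = (d, BSt.qval kk []) by
          simp [bStep, hq, pvIsWs]]
      rw [L_quoted l (aSkipWs l q0 + 1) d kk []]
      exact ham _ (by have := aQuoted_le l (aSkipWs l q0 + 1) []; omega) _
    · rw [if_neg (by simp [hq])]
      by_cases hsc : pvIsSc c5 = true
      · -- value is empty: the separator right after '=' stops the bare-value scan at once
        have hv : aValueEnd l (aSkipWs l q0) = aSkipWs l q0 := by
          rw [aValueEnd_eq, dif_pos h5lt, if_pos (by rw [h5c]; simp [pvIsSep, hsc])]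
        rw [hv, Nat.sub_self]
        simp only [List.take_zero, mk_nil_eq]
        rw [show bStep (d, BSt.preval kk) c5 = (d.insert (String.mk kk) "", BSt.skip) by
            simp [bStep, h5w, hq, hsc],
          ham _ (by omega) _, List.drop_eq_getElem_cons h5lt, Bfold_cons, h5c,
          show bStep (d.insert (String.mk kk) "", BSt.skip) c5
              = (d.insert (String.mk kk) "", BSt.skip) by simp [bStep, pvIsSep, hsc]]
      · -- bare value of at least one character
        have hsep : pvIsSep c5 = false := by simp [pvIsSep, h5w, hsc]
        have hv : aValueEnd l (aSkipWs l q0) = aValueEnd l (aSkipWs l q0 + 1) := by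
          conv_lhs => rw [aValueEnd_eq]
          rw [dif_pos h5lt, if_neg (by rw [h5c]; simp [hsep])]
        have hv1 := aValueEnd_le l (aSkipWs l q0 + 1)
        rw [hv,
          show bStep (d, BSt.preval kk) c5 = (d, BSt.value kk [c5]) by
            simp [bStep, h5w, hq, hsc],
          L_value l (aSkipWs l q0 + 1) d kk [c5],
          ham _ (by omega) _]
        have htake : (c5 :: l.drop (aSkipWs l q0 + 1)).take (aValueEnd l (aSkipWs l q0 + 1) - aSkipWs l q0)
            = [c5] ++ (l.drop (aSkipWs l q0 + 1)).take (aValueEnd l (aSkipWs l q0 + 1) - (aSkipWs l q0 + 1)) := by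
          rw [show aValueEnd l (aSkipWs l q0 + 1) - aSkipWs l q0
                = (aValueEnd l (aSkipWs l q0 + 1) - (aSkipWs l q0 + 1)) + 1 by omega,
            List.take_succ_cons]
          rfl
        rw [htake]
        -- both sides finish the value at aValueEnd and re-enter 'skip'
        cases hp6 : l[aValueEnd l (aSkipWs l q0 + 1)]? with
        | none =>
          rw [drop_of_ge l _ (List.getElem?_eq_none_iff.mp hp6)]
          rfl
        | some c6 =>
          obtain ⟨h6lt, h6c⟩ := List.getElem?_eq_some_iff.mp hp6
          have h6s : pvIsSep c6 = true := by rw [← h6c]; exact aValueEnd_stop l _ h6lt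
          rw [List.drop_eq_getElem_cons h6lt, Bfold_cons, Bfold_cons, h6c,
            show bStep (d, BSt.value kk ([c5] ++ (l.drop (aSkipWs l q0 + 1)).take (aValueEnd l (aSkipWs l q0 + 1) - (aSkipWs l q0 + 1)))) c6
                = (d.insert (String.mk kk) (String.mk ([c5] ++ (l.drop (aSkipWs l q0 + 1)).take (aValueEnd l (aSkipWs l q0 + 1) - (aSkipWs l q0 + 1)))), BSt.skip) by
              simp [bStep, h6s],
            show ∀ d' : PySem.Dict String String, bStep (d', BSt.skip) c6 = (d', BSt.skip) from
              fun d' => by simp [bStep, h6s]]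

-- the main bridge: A's outer loop from position pos = B's fold over the corresponding suffix
theorem L_mainF (l : List Char) : ∀ (fuel pos : Nat) (d : PySem.Dict String String),
    l.length - pos < fuel → aMainF l fuel pos d = Bfold (l.drop pos) (d, .skip) := by
  intro fuel
  induction fuel with
  | zero => intro pos d h; omega
  | succ n ih =>
    intro pos d hn
    by_cases h0 : pos < l.length
    · have hle1 := aSkipSeps_le l pos
      have hle2 := aKeyEnd_le l (aSkipSeps l pos)
      rw [L_seps l pos d]
      unfold aMainF
      rw [dif_pos h0]
      dsimp only
      by_cases h1 : aSkipSeps l pos < l.length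
      · rw [dif_pos h1]
        -- the key starts: B leaves 'skip' exactly as if it were 'key []'
        have hsep1 : pvIsSep l[aSkipSeps l pos] = false := aSkipSeps_stop l pos h1
        have hws1 : pvIsWs l[aSkipSeps l pos] = false := by
          simp [pvIsSep] at hsep1; exact hsep1.1
        have ekey : Bfold (l.drop (aSkipSeps l pos)) (d, .skip)
            = Bfold (l.drop (aSkipSeps l pos)) (d, .key []) := by
          rw [List.drop_eq_getElem_cons h1, Bfold_cons, Bfold_cons]
          by_cases he : l[aSkipSeps l pos] = '='
          · rw [show bStep (d, BSt.skip) l[aSkipSeps l pos] = (d, BSt.preval []) by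
                simp [bStep, he, pvIsSep, pvIsWs, pvIsSc],
              show bStep (d, BSt.key []) l[aSkipSeps l pos] = (d, BSt.preval []) by
                simp [bStep, he, pvIsWs]]
          · rw [show bStep (d, BSt.skip) l[aSkipSeps l pos] = (d, BSt.key [l[aSkipSeps l pos]]) by
                simp [bStep, hsep1, he],
              show bStep (d, BSt.key []) l[aSkipSeps l pos] = (d, BSt.key [l[aSkipSeps l pos]]) by
                simp [bStep, hws1, he]]
        rw [ekey, L_key l (aSkipSeps l pos) d [], List.nil_append]
        cases hp2 : l[aKeyEnd l (aSkipSeps l pos)]? with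
        | none =>
          -- input ends inside/right after the key: the key is dropped by both sides
          have h2n : l.length ≤ aKeyEnd l (aSkipSeps l pos) := List.getElem?_eq_none_iff.mp hp2
          have hw : aSkipWs l (aKeyEnd l (aSkipSeps l pos)) = aKeyEnd l (aSkipSeps l pos) := by
            rw [aSkipWs_eq, dif_neg (by omega)]
          rw [hw, if_neg (by rw [hp2]; simp)]
          have hr : aResync l (aKeyEnd l (aSkipSeps l pos)) = aKeyEnd l (aSkipSeps l pos) := by
            rw [aResync_eq, dif_neg (by omega)]
          rw [hr, ih _ d (by omega), drop_of_ge l _ h2n]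
          rfl
        | some c2 =>
          obtain ⟨h2lt, h2c⟩ := List.getElem?_eq_some_iff.mp hp2
          have h2stop : (pvIsWs c2 || c2 == '=') = true := by
            rw [← h2c]; exact aKeyEnd_stop l (aSkipSeps l pos) h2lt
          by_cases hw2 : pvIsWs c2 = true
          · -- whitespace after the key: B moves to 'preeq', A runs its ws-skip loop
            have hwstep : aSkipWs l (aKeyEnd l (aSkipSeps l pos))
                = aSkipWs l (aKeyEnd l (aSkipSeps l pos) + 1) := by
              conv_lhs => rw [aSkipWs_eq]
              rw [dif_pos h2lt, if_pos (by rw [h2c]; exact hw2)]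
            rw [List.drop_eq_getElem_cons h2lt, Bfold_cons, h2c,
              show bStep (d, BSt.key ((l.drop (aSkipSeps l pos)).take (aKeyEnd l (aSkipSeps l pos) - aSkipSeps l pos))) c2
                  = (d, BSt.preeq ((l.drop (aSkipSeps l pos)).take (aKeyEnd l (aSkipSeps l pos) - aSkipSeps l pos))) by
                simp [bStep, hw2],
              L_preeq, hwstep]
            have hle3 := aSkipWs_le l (aKeyEnd l (aSkipSeps l pos) + 1)
            cases hp3 : l[aSkipWs l (aKeyEnd l (aSkipSeps l pos) + 1)]? with
            | none =>
              have h3n : l.length ≤ aSkipWs l (aKeyEnd l (aSkipSeps l pos) + 1) :=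
                List.getElem?_eq_none_iff.mp hp3
              rw [if_neg (by simp)]
              have hr : aResync l (aSkipWs l (aKeyEnd l (aSkipSeps l pos) + 1))
                  = aSkipWs l (aKeyEnd l (aSkipSeps l pos) + 1) := by
                rw [aResync_eq, dif_neg (by omega)]
              rw [hr, ih _ d (by omega), drop_of_ge l _ h3n]
              rfl
            | some c3 =>
              obtain ⟨h3lt, h3c⟩ := List.getElem?_eq_some_iff.mp hp3
              have h3w : pvIsWs c3 = false := by
                rw [← h3c]; exact aSkipWs_stop l _ h3lt
              by_cases he3 : c3 = '='
              · -- '=' found after whitespace: both sides enter the value phase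
                rw [if_pos (by rw [he3]),
                  List.drop_eq_getElem_cons h3lt, Bfold_cons, h3c,
                  show bStep (d, BSt.preeq ((l.drop (aSkipSeps l pos)).take (aKeyEnd l (aSkipSeps l pos) - aSkipSeps l pos))) c3
                      = (d, BSt.preval ((l.drop (aSkipSeps l pos)).take (aKeyEnd l (aSkipSeps l pos) - aSkipSeps l pos))) by
                    simp [bStep, he3, pvIsWs]]
                exact L_glue l (aSkipWs l (aKeyEnd l (aSkipSeps l pos) + 1) + 1) d _
                  (aMainF l n) (fun p' hp' d' => ih p' d' (by omega))
              · -- no '=': A resyncs to the next separator, B does the same in 'resync'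
                rw [if_neg (by simp [he3]),
                  List.drop_eq_getElem_cons h3lt, Bfold_cons, h3c]
                by_cases hsc3 : pvIsSc c3 = true
                · have hr : aResync l (aSkipWs l (aKeyEnd l (aSkipSeps l pos) + 1))
                      = aSkipWs l (aKeyEnd l (aSkipSeps l pos) + 1) := by
                    rw [aResync_eq, dif_pos h3lt, if_pos (by rw [h3c]; exact hsc3)]
                  rw [hr, ih _ d (by omega),
                    show bStep (d, BSt.preeq ((l.drop (aSkipSeps l pos)).take (aKeyEnd l (aSkipSeps l pos) - aSkipSeps l pos))) c3
                        = (d, BSt.skip) by simp [bStep, h3w, he3, hsc3],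
                    List.drop_eq_getElem_cons h3lt, Bfold_cons, h3c,
                    show bStep (d, BSt.skip) c3 = (d, BSt.skip) by
                      simp [bStep, pvIsSep, hsc3]]
                · have hr : aResync l (aSkipWs l (aKeyEnd l (aSkipSeps l pos) + 1))
                      = aResync l (aSkipWs l (aKeyEnd l (aSkipSeps l pos) + 1) + 1) := by
                    conv_lhs => rw [aResync_eq]
                    rw [dif_pos h3lt, if_neg (by rw [h3c]; simp [hsc3])]
                  have hle4 := aResync_le l (aSkipWs l (aKeyEnd l (aSkipSeps l pos) + 1) + 1)
                  rw [hr, ih _ d (by omega),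
                    show bStep (d, BSt.preeq ((l.drop (aSkipSeps l pos)).take (aKeyEnd l (aSkipSeps l pos) - aSkipSeps l pos))) c3
                        = (d, BSt.resync) by simp [bStep, h3w, he3, hsc3],
                    L_resync]
                  cases hp4 : l[aResync l (aSkipWs l (aKeyEnd l (aSkipSeps l pos) + 1) + 1)]? with
                  | none =>
                    rw [drop_of_ge l _ (List.getElem?_eq_none_iff.mp hp4)]
                    rfl
                  | some c4 =>
                    obtain ⟨h4lt, h4c⟩ := List.getElem?_eq_some_iff.mp hp4
                    have h4sc : pvIsSc c4 = true := by
                      rw [← h4c]; exact aResync_stop l _ h4lt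
                    rw [List.drop_eq_getElem_cons h4lt, Bfold_cons, Bfold_cons, h4c,
                      show bStep (d, BSt.resync) c4 = (d, BSt.skip) by simp [bStep, h4sc],
                      show bStep (d, BSt.skip) c4 = (d, BSt.skip) by simp [bStep, pvIsSep, h4sc]]
          · -- '=' directly after the key (no whitespace)
            have he2 : c2 = '=' := by
              rcases Bool.or_eq_true_iff.mp h2stop with h | h
              · exact absurd h (by simp [hw2])
              · exact eq_of_beq h
            have hw : aSkipWs l (aKeyEnd l (aSkipSeps l pos)) = aKeyEnd l (aSkipSeps l pos) := by
              rw [aSkipWs_eq, dif_pos h2lt, if_neg (by rw [h2c]; simp [hw2])]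
            rw [hw, if_pos (by rw [hp2, he2]),
              List.drop_eq_getElem_cons h2lt, Bfold_cons, h2c,
              show bStep (d, BSt.key ((l.drop (aSkipSeps l pos)).take (aKeyEnd l (aSkipSeps l pos) - aSkipSeps l pos))) c2
                  = (d, BSt.preval ((l.drop (aSkipSeps l pos)).take (aKeyEnd l (aSkipSeps l pos) - aSkipSeps l pos))) by
                simp [bStep, he2, pvIsWs]]
            exact L_glue l (aKeyEnd l (aSkipSeps l pos) + 1) d _
              (aMainF l n) (fun p' hp' d' => ih p' d' (by omega))
      · rw [dif_neg h1, drop_of_ge l _ (by omega)]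
        rfl
    · rw [drop_of_ge l pos (by omega)]
      unfold aMainF; rw [dif_neg h0]; rfl

theorem L_main (l : List Char) (pos : Nat) (d : PySem.Dict String String) :
    aMain l pos d = Bfold (l.drop pos) (d, .skip) :=
  L_mainF l (l.length - pos + 1) pos d (by omega)

-- ===== VERDICT (by name: the statement is the Claim_ definition above) =====
theorem parse_dot_attrs_spec : Claim_equal_parse_dot_attrs := by
  intro attr_text _
  unfold Spec_parse_dot_attrs parse_dot_attrs parse_dot_attrs_alt
  match attr_text with
  | none => rfl
  | some s =>
    by_cases h : s.toList.isEmpty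
    · simp [h]
    · simp only [h, if_false, Bool.false_eq_true]
      rw [L_main]
      rfl
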